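-- pv_equiv track=rewrite | github.com/jamesobin/coding_test | 프로그래머스/0/181893. 배열 조각하기/배열 조각하기.py | solution
-- ===== SOURCE A (Python) =====
-- def solution(arr, query):
--     answer = []
--
--     for i in range(0, len(query)):
--         if i % 2 == 0:
--             arr = arr[:query[i]+1]
--         else:
--             arr = arr[query[i]:]
--
--     answer = arr
--
--     return answer
-- ===== SOURCE B (Python) =====
-- def _clamp(n, k):
--     # normalize a Python slice bound k against length n
--     if k < 0:
--         return max(0, k + n)
--     return min(k, n)
--
--
-- def solution(arr, query):
--     # Track the window [lo, hi) as bounds instead of slicing the array per query;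
--     # slice the original array exactly once at the end.
--     lo, hi = 0, len(arr)
--     for i, q in enumerate(query):
--         n = hi - lo
--         if i % 2 == 0:
--             hi = lo + _clamp(n, q + 1)
--         else:
--             lo = lo + _clamp(n, q)
--     return arr[lo:hi]
-- ===== Notes on version B (the rewrite author's own statement) =====
-- stated objective: alternative
-- what changed: Instead of materializing a new list slice per query, B folds all queries into a single window [lo,hi) of clamped bounds and slices the original array once at the end.
import Mathlib
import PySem

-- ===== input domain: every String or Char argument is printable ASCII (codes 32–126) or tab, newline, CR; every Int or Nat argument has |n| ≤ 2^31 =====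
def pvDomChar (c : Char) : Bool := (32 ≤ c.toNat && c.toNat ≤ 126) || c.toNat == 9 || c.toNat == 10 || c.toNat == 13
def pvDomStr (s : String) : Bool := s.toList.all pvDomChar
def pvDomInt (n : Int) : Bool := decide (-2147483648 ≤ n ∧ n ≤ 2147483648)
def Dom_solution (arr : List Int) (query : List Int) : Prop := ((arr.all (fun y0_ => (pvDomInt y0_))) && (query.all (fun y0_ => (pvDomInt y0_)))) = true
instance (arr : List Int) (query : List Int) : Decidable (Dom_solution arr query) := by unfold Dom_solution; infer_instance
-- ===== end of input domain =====

-- B replaces A's per-query list slicing by folding all queries into one clamped window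
-- [lo, hi) of bounds into the original array, which is sliced once at the end (objective: alternative).

-- ===== PORT A =====
def solution (arr : List Int) (query : List Int) : List Int :=
  let _answer : List Int := []
  let arr :=
    (PySem.List.pyRange 0 (PySem.List.len query) 1).foldl
      (fun a i =>
        if PySem.Int.mod i 2 == 0 then
          PySem.List.slice a none (some (PySem.List.pyGetD query i 0 + 1))
        else
          PySem.List.slice a (some (PySem.List.pyGetD query i 0)) none)
      arr
  let answer := arr
  answer

-- ===== PORT B =====
-- Source B's helper _clamp(n, k): normalize a slice bound k against length n
def pyClamp (n : Int) (k : Int) : Int := if k < 0 then max 0 (k + n) else min k n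

def solution_alt (arr : List Int) (query : List Int) : List Int :=
  let p :=
    (PySem.List.enumerate query).foldl
      (fun (s : Int × Int) (iq : Int × Int) =>
        let n := s.2 - s.1
        if PySem.Int.mod iq.1 2 == 0 then (s.1, s.1 + pyClamp n (iq.2 + 1))
        else (s.1 + pyClamp n iq.2, s.2))
      (0, PySem.List.len arr)
  PySem.List.slice arr (some p.1) (some p.2)

-- ===== PRECONDITION & SPEC =====
def Spec_solution (arr : List Int) (query : List Int) (out : List Int) : Prop := out = solution_alt arr query
instance (arr : List Int) (query : List Int) (out : List Int) : Decidable (Spec_solution arr query out) := by unfold Spec_solution; infer_instance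

-- ===== CLAIM (what is proved, stated in full; the proofs are below) =====
def Claim_equal_solution : Prop := ∀ (arr : List Int) (query : List Int), Dom_solution arr query → Spec_solution arr query (solution arr query)

-- ===== LEMMAS AND PROOFS =====

-- A's loop body, as a function of the pair (index, query value)
def pvStepA (a : List Int) (iq : Int × Int) : List Int :=
  if PySem.Int.mod iq.1 2 == 0 then
    PySem.List.slice a none (some (iq.2 + 1))
  else
    PySem.List.slice a (some iq.2) none

-- B's loop body
def pvStepB (s : Int × Int) (iq : Int × Int) : Int × Int :=
  let n := s.2 - s.1
  if PySem.Int.mod iq.1 2 == 0 then (s.1, s.1 + pyClamp n (iq.2 + 1))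
  else (s.1 + pyClamp n iq.2, s.2)

-- the window of xs described by a bounds pair
def pvWin (xs : List Int) (p : Int × Int) : List Int :=
  (xs.drop p.1.toNat).take (p.2 - p.1).toNat

theorem pyClamp_bounds (n k : Int) (hn : 0 ≤ n) : 0 ≤ pyClamp n k ∧ pyClamp n k ≤ n := by
  unfold pyClamp; split_ifs <;> omega

theorem pvClampIdx_eq (m : Nat) (b : Int) :
    PySem.List.clampIdx m b = (pyClamp (m : Int) b).toNat := by
  unfold pyClamp PySem.List.clampIdx; split_ifs <;> omega

theorem pvWin_len (xs : List Int) (lo hi : Int) (h0 : 0 ≤ lo)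
    (h2 : hi ≤ (xs.length : Int)) : (pvWin xs (lo, hi)).length = (hi - lo).toNat := by
  simp [pvWin]; omega

theorem pvSlice_none_some (w : List Int) (b : Int) :
    PySem.List.slice w none (some b) = w.take (PySem.List.clampIdx w.length b) := by
  simp [PySem.List.slice]

theorem pvStep_even (xs : List Int) (lo hi b : Int) (h0 : 0 ≤ lo) (h1 : lo ≤ hi)
    (h2 : hi ≤ (xs.length : Int)) :
    PySem.List.slice (pvWin xs (lo, hi)) none (some b)
      = pvWin xs (lo, lo + pyClamp (hi - lo) b) := by
  have hb := pyClamp_bounds (hi - lo) b (by omega)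
  rw [pvSlice_none_some, pvWin_len xs lo hi h0 h2, pvClampIdx_eq]
  have hcast : ((hi - lo).toNat : Int) = hi - lo := by omega
  rw [hcast]
  simp only [pvWin, List.take_take]
  have e : min (pyClamp (hi - lo) b).toNat (hi - lo).toNat
      = (lo + pyClamp (hi - lo) b - lo).toNat := by omega
  rw [e]

theorem pvStep_odd (xs : List Int) (lo hi a : Int) (h0 : 0 ≤ lo) (h1 : lo ≤ hi)
    (h2 : hi ≤ (xs.length : Int)) :
    PySem.List.slice (pvWin xs (lo, hi)) (some a) none
      = pvWin xs (lo + pyClamp (hi - lo) a, hi) := by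
  have hb := pyClamp_bounds (hi - lo) a (by omega)
  rw [PySem.List.slice_some_none, pvWin_len xs lo hi h0 h2, pvClampIdx_eq]
  have hcast : ((hi - lo).toNat : Int) = hi - lo := by omega
  rw [hcast]
  simp only [pvWin, List.drop_take, List.drop_drop]
  have e1 : (hi - lo).toNat - (pyClamp (hi - lo) a).toNat
      = (hi - (lo + pyClamp (hi - lo) a)).toNat := by omega
  have e2 : lo.toNat + (pyClamp (hi - lo) a).toNat = (lo + pyClamp (hi - lo) a).toNat := by omega
  rw [e1, e2]

-- loop invariant: A's running array is the window of the original array at B's running bounds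
theorem pvMain (qs : List Int) : ∀ (s : Int) (xs : List Int) (lo hi : Int),
    0 ≤ lo → lo ≤ hi → hi ≤ (xs.length : Int) →
    (PySem.List.enumerate qs s).foldl pvStepA (pvWin xs (lo, hi))
        = pvWin xs ((PySem.List.enumerate qs s).foldl pvStepB (lo, hi))
      ∧ 0 ≤ ((PySem.List.enumerate qs s).foldl pvStepB (lo, hi)).1
      ∧ ((PySem.List.enumerate qs s).foldl pvStepB (lo, hi)).1
          ≤ ((PySem.List.enumerate qs s).foldl pvStepB (lo, hi)).2
      ∧ ((PySem.List.enumerate qs s).foldl pvStepB (lo, hi)).2 ≤ (xs.length : Int) := by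
  induction qs with
  | nil => intro s xs lo hi h0 h1 h2; simp [PySem.List.enumerate_nil]; omega
  | cons q qs ih =>
    intro s xs lo hi h0 h1 h2
    rw [PySem.List.enumerate_cons]
    simp only [List.foldl_cons]
    by_cases hpar : PySem.Int.mod s 2 == 0
    · have hstepA : pvStepA (pvWin xs (lo, hi)) (s, q)
          = pvWin xs (lo, lo + pyClamp (hi - lo) (q + 1)) := by
        simp only [pvStepA]
        rw [if_pos hpar]
        exact pvStep_even xs lo hi (q + 1) h0 h1 h2
      have hstepB : pvStepB (lo, hi) (s, q) = (lo, lo + pyClamp (hi - lo) (q + 1)) := by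
        simp only [pvStepB]
        rw [if_pos hpar]
      have hb := pyClamp_bounds (hi - lo) (q + 1) (by omega)
      rw [hstepA, hstepB]
      exact ih (s + 1) xs lo (lo + pyClamp (hi - lo) (q + 1)) h0 (by omega) (by omega)
    · have hstepA : pvStepA (pvWin xs (lo, hi)) (s, q)
          = pvWin xs (lo + pyClamp (hi - lo) q, hi) := by
        simp only [pvStepA]
        rw [if_neg hpar]
        exact pvStep_odd xs lo hi q h0 h1 h2
      have hstepB : pvStepB (lo, hi) (s, q) = (lo + pyClamp (hi - lo) q, hi) := by
        simp only [pvStepB]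
        rw [if_neg hpar]
      have hb := pyClamp_bounds (hi - lo) q (by omega)
      rw [hstepA, hstepB]
      exact ih (s + 1) xs (lo + pyClamp (hi - lo) q) hi (by omega) (by omega) h2

-- A's index loop over range(len(query)) is the fold of pvStepA over enumerate(query)
theorem pvA_eq (arr query : List Int) :
    solution arr query = (PySem.List.enumerate query).foldl pvStepA arr := by
  rw [PySem.List.enumerate_eq_map_pyRange query 0, List.foldl_map]
  rfl

theorem pvB_eq (arr query : List Int) :
    solution_alt arr query =
      PySem.List.slice arr
        (some ((PySem.List.enumerate query).foldl pvStepB (0, PySem.List.len arr)).1)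
        (some ((PySem.List.enumerate query).foldl pvStepB (0, PySem.List.len arr)).2) := by
  rfl

theorem pvWin_full (arr : List Int) : pvWin arr (0, PySem.List.len arr) = arr := by
  simp [pvWin, PySem.List.len]

-- ===== VERDICT (by name: the statement is the Claim_ definition above) =====
theorem solution_spec : Claim_equal_solution := by
  intro arr query _
  unfold Spec_solution
  rw [pvA_eq, pvB_eq]
  have h := pvMain query 0 arr 0 (PySem.List.len arr) le_rfl
    (by simp [PySem.List.len]) (by simp [PySem.List.len])
  rcases h with ⟨hwin, hp0, hp12, hp2⟩
  conv_lhs => rw [← pvWin_full arr]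
  rw [hwin, PySem.List.slice_toNat arr hp0 (le_trans hp0 hp12)]
  simp only [pvWin]
  congr 1
  omega
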